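-- pv_equiv track=rewrite | github.com/HanFayeDD/leetcode | company/xunlei/t2.py | extendresordnot
-- ===== SOURCE A (Python) =====
-- from typing import List
-- from typing import List
--
-- def extendresordnot(nums:List[int], k:int, flag:List[bool]):
--     r = []
--     for i in range(len(flag)):
--         if flag[i]:
--             left = i
--             right = i+1
--             nowk = 0
--             while left >= 0 and right <= len(nums)-1 and str(nums[left]) == str(nums[right])[::-1] and nowk < k:
--                 nowk += 2
--                 left -= 1
--                 right += 1
--             if nowk >= k:
--                 r.append(i - (k//2) + 1)
--     return r
-- ===== SOURCE B (Python) =====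
-- def extendresordnot(nums, k, flag):
--     # A center i (with flag[i]) qualifies iff the first ceil(k/2) expansion
--     # steps all match; bounds are decided arithmetically up front, the digit
--     # strings / reversed digit strings are computed once, and the whole
--     # window is compared as one slice (behind a cheap first-pair fast path).
--     n = len(nums)
--     shift = 1 - k // 2
--     if k <= 0:
--         return [i + shift for i in range(len(flag)) if flag[i]]
--     need = (k + 1) // 2
--     strs = [str(x) for x in nums]
--     rev = [s[::-1] for s in strs]
--     res = []
--     for i in range(len(flag)):
--         if flag[i] and need <= i + 1 and i + need < n \
--                 and strs[i] == rev[i + 1] \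
--                 and strs[i - need + 1 : i + 1][::-1] == rev[i + 1 : i + need + 1]:
--             res.append(i + shift)
--     return res
-- ===== Notes on version B (the rewrite author's own statement) =====
-- stated objective: alternative
-- what changed: B replaces A's per-center outward two-pointer expansion (which rebuilds str(...) and its reversal at every step) by computing the digit strings and their reversals once, deciding the window bounds arithmetically up front (window size ceil(k/2), closed-form branch for k <= 0), and comparing the whole window as one slice behind a cheap first-pair test.
import Mathlib
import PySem

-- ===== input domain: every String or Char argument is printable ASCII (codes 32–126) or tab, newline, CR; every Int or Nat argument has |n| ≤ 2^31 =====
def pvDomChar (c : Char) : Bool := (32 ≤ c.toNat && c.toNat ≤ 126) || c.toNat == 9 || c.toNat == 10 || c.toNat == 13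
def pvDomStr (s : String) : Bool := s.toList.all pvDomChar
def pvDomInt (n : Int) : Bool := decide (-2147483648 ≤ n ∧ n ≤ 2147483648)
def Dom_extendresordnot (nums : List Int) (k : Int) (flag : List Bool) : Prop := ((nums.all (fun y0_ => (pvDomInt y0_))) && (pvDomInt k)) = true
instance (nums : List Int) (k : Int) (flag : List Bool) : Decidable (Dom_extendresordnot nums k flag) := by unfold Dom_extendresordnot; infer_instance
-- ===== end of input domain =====

-- B replaces A's per-center outward expansion by a single fixed-window slice comparison
-- over digit strings precomputed once (objective: alternative).

-- ===== PORT A =====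
-- Python s[::-1] (exact: PySem.Str.slice?_none_none_neg_one)
def pvStrRev (s : String) : String := String.ofList s.toList.reverse

-- the while loop of A: state (left, right, nowk)
def extendresordnotLoop (nums : List Int) (k : Int) (left right nowk : Int) : Int :=
  if h : 0 ≤ left ∧ right ≤ (nums.length : Int) - 1 ∧
      PySem.Int.toStr (PySem.List.pyGetD nums left 0)
        = pvStrRev (PySem.Int.toStr (PySem.List.pyGetD nums right 0)) ∧ nowk < k
  then extendresordnotLoop nums k (left - 1) (right + 1) (nowk + 2)
  else nowk
termination_by (k - nowk).toNat
decreasing_by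
  have := h.2.2.2; omega

def extendresordnot (nums : List Int) (k : Int) (flag : List Bool) : List Int :=
  (PySem.List.pyRange 0 (flag.length : Int) 1).foldl (fun r i =>
    if PySem.List.pyGetD flag i false then
      (if extendresordnotLoop nums k i (i + 1) 0 ≥ k
       then r ++ [i - PySem.Int.floordiv k 2 + 1] else r)
    else r) []

-- ===== PORT B =====
def extendresordnot_alt (nums : List Int) (k : Int) (flag : List Bool) : List Int :=
  let n : Int := nums.length
  let shift : Int := 1 - PySem.Int.floordiv k 2
  if k ≤ 0 then
    ((PySem.List.pyRange 0 (flag.length : Int) 1).filter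
        (fun i => PySem.List.pyGetD flag i false)).map (fun i => i + shift)
  else
    let need : Int := PySem.Int.floordiv (k + 1) 2
    let strs := nums.map PySem.Int.toStr
    let rev := strs.map pvStrRev
    (PySem.List.pyRange 0 (flag.length : Int) 1).foldl (fun res i =>
      if PySem.List.pyGetD flag i false && decide (need ≤ i + 1) && decide (i + need < n) &&
          decide (PySem.List.pyGetD strs i "" = PySem.List.pyGetD rev (i + 1) "") &&
          decide ((PySem.List.slice strs (some (i - need + 1)) (some (i + 1))).reverse
              = PySem.List.slice rev (some (i + 1)) (some (i + need + 1)))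
      then res ++ [i + shift] else res) []

-- ===== PRECONDITION & SPEC =====
def Spec_extendresordnot (nums : List Int) (k : Int) (flag : List Bool) (out : List Int) : Prop := out = extendresordnot_alt nums k flag
instance (nums : List Int) (k : Int) (flag : List Bool) (out : List Int) : Decidable (Spec_extendresordnot nums k flag out) := by unfold Spec_extendresordnot; infer_instance

-- ===== CLAIM (what is proved, stated in full; the proofs are below) =====
def Claim_equal_extendresordnot : Prop := ∀ (nums : List Int) (k : Int) (flag : List Bool), Dom_extendresordnot nums k flag → Spec_extendresordnot nums k flag (extendresordnot nums k flag)

-- ===== LEMMAS AND PROOFS =====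

-- the matching relation of one expansion step
def pvM (nums : List Int) (l r : Int) : Prop :=
  PySem.Int.toStr (PySem.List.pyGetD nums l 0)
    = pvStrRev (PySem.Int.toStr (PySem.List.pyGetD nums r 0))

-- one expansion step's full continuation condition
def pvC (nums : List Int) (i : Int) (s : Nat) : Prop :=
  0 ≤ i - s ∧ i + 1 + s ≤ (nums.length : Int) - 1 ∧ pvM nums (i - s) (i + 1 + s)

lemma pv_need_bounds (k : Int) (hk : 0 < k) :
    2 * ((PySem.Int.floordiv (k + 1) 2).toNat : Int) - 1 ≤ k ∧
    k ≤ 2 * ((PySem.Int.floordiv (k + 1) 2).toNat : Int) := by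
  rw [PySem.Int.floordiv_eq_ediv_of_pos (by omega)]
  omega

lemma pv_loop_iff (nums : List Int) (k : Int) (hk : 0 < k) (i : Int) :
    ∀ d : Nat, d ≤ (PySem.Int.floordiv (k + 1) 2).toNat →
      (extendresordnotLoop nums k (i - ((PySem.Int.floordiv (k + 1) 2).toNat - d : Nat))
          (i + 1 + ((PySem.Int.floordiv (k + 1) 2).toNat - d : Nat))
          (2 * ((PySem.Int.floordiv (k + 1) 2).toNat - d : Nat)) ≥ k ↔
        ∀ s : Nat, (PySem.Int.floordiv (k + 1) 2).toNat - d ≤ s →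
          s < (PySem.Int.floordiv (k + 1) 2).toNat → pvC nums i s) := by
  have hnb := pv_need_bounds k hk
  intro d
  induction d with
  | zero =>
    intro _
    simp only [Nat.sub_zero]
    rw [extendresordnotLoop]
    rw [dif_neg (by intro hcon; have := hcon.2.2.2; omega)]
    constructor
    · intro _ s h1 h2; omega
    · intro _; omega
  | succ d ih =>
    intro hd
    have htlt : (PySem.Int.floordiv (k + 1) 2).toNat - (d + 1) <
        (PySem.Int.floordiv (k + 1) 2).toNat := by omega
    set t := (PySem.Int.floordiv (k + 1) 2).toNat - (d + 1) with ht
    have ht1 : (PySem.Int.floordiv (k + 1) 2).toNat - d = t + 1 := by omega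
    have hlt : 2 * (t : Int) < k := by omega
    rw [extendresordnotLoop]
    by_cases hC : pvC nums i t
    · rw [dif_pos ⟨hC.1, hC.2.1, hC.2.2, hlt⟩]
      have e1 : i - (t : Int) - 1 = i - ((t + 1 : Nat) : Int) := by push_cast; ring
      have e2 : i + 1 + (t : Int) + 1 = i + 1 + ((t + 1 : Nat) : Int) := by push_cast; ring
      have e3 : 2 * (t : Int) + 2 = 2 * ((t + 1 : Nat) : Int) := by push_cast; ring
      rw [e1, e2, e3]
      have ih' := ih (by omega)
      rw [ht1] at ih'
      rw [ih']
      constructor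
      · intro h s hs1 hs2
        rcases Nat.lt_or_ge s (t + 1) with hlt' | hge
        · have : s = t := by omega
          rw [this]; exact hC
        · exact h s hge hs2
      · intro h s hs1 hs2
        exact h s (by omega) hs2
    · rw [dif_neg (by intro hcon; exact hC ⟨hcon.1, hcon.2.1, hcon.2.2.1⟩)]
      constructor
      · intro h; omega
      · intro h; exact absurd (h t le_rfl htlt) hC

lemma pv_loop_start_iff (nums : List Int) (k : Int) (hk : 0 < k) (i : Int) :
    (extendresordnotLoop nums k i (i + 1) 0 ≥ k ↔
      ∀ s : Nat, s < (PySem.Int.floordiv (k + 1) 2).toNat → pvC nums i s) := by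
  have h := pv_loop_iff nums k hk i (PySem.Int.floordiv (k + 1) 2).toNat le_rfl
  simpa using h

lemma pv_fast_iff (nums : List Int) (k : Int) (hk : 0 < k) (i : Int)
    (hb1 : PySem.Int.floordiv (k + 1) 2 ≤ i + 1)
    (hb2 : i + PySem.Int.floordiv (k + 1) 2 < (nums.length : Int)) :
    (PySem.List.pyGetD (nums.map PySem.Int.toStr) i ""
        = PySem.List.pyGetD ((nums.map PySem.Int.toStr).map pvStrRev) (i + 1) "") ↔
      pvM nums i (i + 1) := by
  have hnb := pv_need_bounds k hk
  have hfd : PySem.Int.floordiv (k + 1) 2 = ((PySem.Int.floordiv (k + 1) 2).toNat : Int) := by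
    rw [PySem.Int.floordiv_eq_ediv_of_pos (by omega : (0:Int) < 2)] at *
    omega
  rw [hfd] at hb1 hb2
  have hi0 : 0 ≤ i := by omega
  have hi1 : i + 1 < (nums.length : Int) := by omega
  rw [PySem.List.pyGetD_eq_getElem _ _ hi0 (by simpa using by omega : i < ((nums.map PySem.Int.toStr).length : Int)),
      PySem.List.pyGetD_eq_getElem _ _ (by omega) (by simpa using by omega : i + 1 < (((nums.map PySem.Int.toStr).map pvStrRev).length : Int))]
  rw [pvM, PySem.List.pyGetD_eq_getElem nums 0 hi0 (by omega),
      PySem.List.pyGetD_eq_getElem nums 0 (by omega) (by omega)]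
  simp only [List.getElem_map]

lemma pv_slice_iff (nums : List Int) (k : Int) (hk : 0 < k) (i : Int)
    (hb1 : PySem.Int.floordiv (k + 1) 2 ≤ i + 1)
    (hb2 : i + PySem.Int.floordiv (k + 1) 2 < (nums.length : Int)) :
    ((PySem.List.slice (nums.map PySem.Int.toStr)
        (some (i - PySem.Int.floordiv (k + 1) 2 + 1)) (some (i + 1))).reverse
      = PySem.List.slice ((nums.map PySem.Int.toStr).map pvStrRev)
        (some (i + 1)) (some (i + PySem.Int.floordiv (k + 1) 2 + 1)) ↔
      ∀ s : Nat, s < (PySem.Int.floordiv (k + 1) 2).toNat → pvM nums (i - s) (i + 1 + s)) := by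
  have hnb := pv_need_bounds k hk
  have hfd : PySem.Int.floordiv (k + 1) 2 = ((PySem.Int.floordiv (k + 1) 2).toNat : Int) := by
    rw [PySem.Int.floordiv_eq_ediv_of_pos (by omega : (0:Int) < 2)] at *
    omega
  set nn := (PySem.Int.floordiv (k + 1) 2).toNat with hnn
  have hnn1 : 1 ≤ nn := by omega
  have hi0 : 0 ≤ i := by rw [hfd] at hb1; omega
  set iN := i.toNat with hiNdef
  have hiN : i = (iN : Int) := by omega
  have hbn1 : nn ≤ iN + 1 := by rw [hfd] at hb1; omega
  have hbn2 : iN + nn < nums.length := by rw [hfd] at hb2; omega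
  rw [PySem.List.slice_toNat _ (by rw [hfd]; omega) (by omega),
      PySem.List.slice_toNat _ (by omega) (by rw [hfd]; omega)]
  rw [show (i - PySem.Int.floordiv (k + 1) 2 + 1).toNat = iN + 1 - nn from by rw [hfd]; omega,
      show (i + 1).toNat = iN + 1 from by omega,
      show (i + PySem.Int.floordiv (k + 1) 2 + 1).toNat = iN + nn + 1 from by rw [hfd]; omega]
  rw [show iN + 1 - (iN + 1 - nn) = nn from by omega,
      show iN + nn + 1 - (iN + 1) = nn from by omega]
  have hlenL : (List.take nn (List.drop (iN + 1 - nn) (nums.map PySem.Int.toStr))).length = nn := by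
    simp
    omega
  have hlenR : (List.take nn (List.drop (iN + 1) ((nums.map PySem.Int.toStr).map pvStrRev))).length = nn := by
    simp
    omega
  have keyL : ∀ t : Nat, t < nn →
      (List.take nn (List.drop (iN + 1 - nn) (nums.map PySem.Int.toStr))).reverse[t]?
        = some (PySem.Int.toStr (PySem.List.pyGetD nums (i - t) 0)) := by
    intro t ht
    rw [List.getElem?_reverse (by rw [hlenL]; exact ht), hlenL]
    rw [List.getElem?_take, if_pos (by omega), List.getElem?_drop]
    rw [show iN + 1 - nn + (nn - 1 - t) = iN - t from by omega]
    rw [List.getElem?_map]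
    rw [List.getElem?_eq_getElem (by omega)]
    rw [PySem.List.pyGetD_eq_getElem nums 0 (by omega) (by omega)]
    simp only [Option.map_some, Option.some.injEq]
    simp only [show (i - (t : Int)).toNat = iN - t from by omega]
  have keyR : ∀ t : Nat, t < nn →
      (List.take nn (List.drop (iN + 1) ((nums.map PySem.Int.toStr).map pvStrRev)))[t]?
        = some (pvStrRev (PySem.Int.toStr (PySem.List.pyGetD nums (i + 1 + t) 0))) := by
    intro t ht
    rw [List.getElem?_take, if_pos ht, List.getElem?_drop]
    simp only [List.map_map]
    rw [List.getElem?_map]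
    rw [List.getElem?_eq_getElem (by omega)]
    rw [PySem.List.pyGetD_eq_getElem nums 0 (by omega) (by omega)]
    simp only [Option.map_some, Option.some.injEq, Function.comp_apply]
    simp only [show (i + 1 + (t : Int)).toNat = iN + 1 + t from by omega]
  constructor
  · intro heq s hs
    have h1 := keyL s hs
    rw [heq] at h1
    rw [keyR s hs] at h1
    have h2 := Option.some.inj h1
    exact h2.symm
  · intro h
    apply List.ext_getElem?
    intro t
    by_cases ht : t < nn
    · rw [keyL t ht, keyR t ht]
      have hM := h t ht
      rw [pvM] at hM
      rw [hM]
    · rw [List.getElem?_eq_none (by simp only [List.length_reverse]; rw [hlenL]; omega),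
          List.getElem?_eq_none (by rw [hlenR]; omega)]

lemma pv_cond_iff (nums : List Int) (k : Int) (hk : 0 < k) (i : Int) :
    ((∀ s : Nat, s < (PySem.Int.floordiv (k + 1) 2).toNat → pvC nums i s) ↔
      (PySem.Int.floordiv (k + 1) 2 ≤ i + 1 ∧
       i + PySem.Int.floordiv (k + 1) 2 < (nums.length : Int) ∧
       ∀ s : Nat, s < (PySem.Int.floordiv (k + 1) 2).toNat → pvM nums (i - s) (i + 1 + s))) := by
  have hnb := pv_need_bounds k hk
  have hfd : PySem.Int.floordiv (k + 1) 2 = ((PySem.Int.floordiv (k + 1) 2).toNat : Int) := by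
    rw [PySem.Int.floordiv_eq_ediv_of_pos (by omega : (0:Int) < 2)] at *
    omega
  constructor
  · intro h
    have hnn : 1 ≤ (PySem.Int.floordiv (k + 1) 2).toNat := by omega
    obtain ⟨c1, c2, -⟩ := h ((PySem.Int.floordiv (k + 1) 2).toNat - 1) (by omega)
    exact ⟨by rw [hfd]; omega, by rw [hfd]; omega, fun s hs => (h s hs).2.2⟩
  · rintro ⟨b1, b2, hm⟩ s hs
    rw [hfd] at b1 b2
    exact ⟨by omega, by omega, hm s hs⟩

-- ===== VERDICT (by name: the statement is the Claim_ definition above) =====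
theorem extendresordnot_spec : Claim_equal_extendresordnot := by
  unfold Claim_equal_extendresordnot
  intro nums k flag _
  unfold Spec_extendresordnot extendresordnot extendresordnot_alt
  by_cases hk : k ≤ 0
  · rw [if_pos hk]
    have hl : ∀ i : Int, extendresordnotLoop nums k i (i + 1) 0 = 0 := by
      intro i
      rw [extendresordnotLoop]
      rw [dif_neg (by intro hcon; have := hcon.2.2.2; omega)]
    have hbody : ∀ (r : List Int) (i : Int),
        (if PySem.List.pyGetD flag i false then
          (if extendresordnotLoop nums k i (i + 1) 0 ≥ k
           then r ++ [i - PySem.Int.floordiv k 2 + 1] else r)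
         else r)
        = (if PySem.List.pyGetD flag i false
           then r ++ [i + (1 - PySem.Int.floordiv k 2)] else r) := by
      intro r i
      rw [hl, if_pos (show (0:Int) ≥ k from hk)]
      rw [show i - PySem.Int.floordiv k 2 + 1 = i + (1 - PySem.Int.floordiv k 2) from by ring]
    refine Eq.trans (PySem.List.foldl_congr_mem _ _ _ _ (fun acc x _ => hbody acc x)) ?_
    rw [PySem.List.foldl_append_if]
    simp
  · rw [if_neg hk]
    have hk' : 0 < k := by omega
    have hbody : ∀ (r : List Int) (i : Int),
        (if PySem.List.pyGetD flag i false then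
          (if extendresordnotLoop nums k i (i + 1) 0 ≥ k
           then r ++ [i - PySem.Int.floordiv k 2 + 1] else r)
         else r)
        = (if PySem.List.pyGetD flag i false &&
              decide (PySem.Int.floordiv (k + 1) 2 ≤ i + 1) &&
              decide (i + PySem.Int.floordiv (k + 1) 2 < (nums.length : Int)) &&
              decide (PySem.List.pyGetD (nums.map PySem.Int.toStr) i ""
                = PySem.List.pyGetD ((nums.map PySem.Int.toStr).map pvStrRev) (i + 1) "") &&
              decide ((PySem.List.slice (nums.map PySem.Int.toStr)
                  (some (i - PySem.Int.floordiv (k + 1) 2 + 1)) (some (i + 1))).reverse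
                = PySem.List.slice ((nums.map PySem.Int.toStr).map pvStrRev)
                  (some (i + 1)) (some (i + PySem.Int.floordiv (k + 1) 2 + 1)))
           then r ++ [i + (1 - PySem.Int.floordiv k 2)] else r) := by
      intro r i
      by_cases hf : PySem.List.pyGetD flag i false
      · simp only [hf, Bool.true_and, if_true]
        have hchar := (pv_loop_start_iff nums k hk' i).trans (pv_cond_iff nums k hk' i)
        by_cases hb1 : PySem.Int.floordiv (k + 1) 2 ≤ i + 1
        · by_cases hb2 : i + PySem.Int.floordiv (k + 1) 2 < (nums.length : Int)
          · by_cases hs : (PySem.List.slice (nums.map PySem.Int.toStr)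
                  (some (i - PySem.Int.floordiv (k + 1) 2 + 1)) (some (i + 1))).reverse
                = PySem.List.slice ((nums.map PySem.Int.toStr).map pvStrRev)
                  (some (i + 1)) (some (i + PySem.Int.floordiv (k + 1) 2 + 1))
            · have hnb := pv_need_bounds k hk'
              have hfast : pvM nums i (i + 1) := by
                have h0 := (pv_slice_iff nums k hk' i hb1 hb2).mp hs 0 (by omega)
                simpa using h0
              rw [if_pos (hchar.mpr ⟨hb1, hb2, (pv_slice_iff nums k hk' i hb1 hb2).mp hs⟩)]
              rw [if_pos (by
                simp only [Bool.and_eq_true, decide_eq_true_eq]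
                exact ⟨⟨⟨hb1, hb2⟩, (pv_fast_iff nums k hk' i hb1 hb2).mpr hfast⟩, hs⟩)]
              rw [show i - PySem.Int.floordiv k 2 + 1 = i + (1 - PySem.Int.floordiv k 2) from by ring]
            · rw [if_neg (fun hge => hs ((pv_slice_iff nums k hk' i hb1 hb2).mpr (hchar.mp hge).2.2)),
                  if_neg (by simp only [Bool.and_eq_true, decide_eq_true_eq]; tauto)]
          · rw [if_neg (fun hge => hb2 (hchar.mp hge).2.1),
                if_neg (by simp only [Bool.and_eq_true, decide_eq_true_eq]; tauto)]
        · rw [if_neg (fun hge => hb1 (hchar.mp hge).1),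
              if_neg (by simp only [Bool.and_eq_true, decide_eq_true_eq]; tauto)]
      · simp only [hf]
        simp
    exact PySem.List.foldl_congr_mem _ _ _ _ (fun acc x _ => hbody acc x)
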